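-- pv_equiv track=rewrite | github.com/mraitmaier/pyrus | utils/iputils.py | check_mask
-- ===== SOURCE A (Python) =====
-- MASK_VALS = { 0:0, 128:1, 192:2, 224:3, 240:4, 248:5, 252:6, 254:7, 255:8 }
--
-- def check_mask(mask):
--    """ Checks whether given IP subnet mask is valid or not.
--    Implements only basic checking.
--    """
--    # make a list from dotted subnet mask
--    lst = mask.split('.')
--    # if list length is not equal to 4, this is invalid
--    if len(lst) != 4:
--       return False
--    # check for list for valid values
--    for num in lst:
--       if int(num) not in list(MASK_VALS.keys()):
--          return False
--    # check continuousness of the list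
--    import copy
--    sorted = copy.copy(lst) # make a shalow copy of the list
--    sorted.sort(reverse=True) # and sort (actually reverse) it
--    if lst != sorted:
--       return False
--    return True
-- ===== SOURCE B (Python) =====
-- MASK_VALS = { 0:0, 128:1, 192:2, 224:3, 240:4, 248:5, 252:6, 254:7, 255:8 }
--
-- def check_mask(mask):
--     """Checks whether given IP subnet mask is valid (basic check)."""
--     parts = mask.split('.')
--     if len(parts) != 4:
--         return False
--     # single pass: validate each value and the string ordering against the
--     # previous part as we go (no copy, no sort, no second loop)
--     prev = None
--     for p in parts:
--         if int(p) not in MASK_VALS: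
--             return False
--         if prev is not None and prev < p:
--             return False
--         prev = p
--     return True
-- ===== Notes on version B (the rewrite author's own statement) =====
-- stated objective: simpler
-- what changed: B replaces A's two-stage check (a value-validation loop followed by copy+sort(reverse=True)+list-equality on the octet strings) with one single pass that carries the previous part and rejects on the first invalid value or the first adjacent string-order increase, so the sort and the second traversal disappear.
import Mathlib
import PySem

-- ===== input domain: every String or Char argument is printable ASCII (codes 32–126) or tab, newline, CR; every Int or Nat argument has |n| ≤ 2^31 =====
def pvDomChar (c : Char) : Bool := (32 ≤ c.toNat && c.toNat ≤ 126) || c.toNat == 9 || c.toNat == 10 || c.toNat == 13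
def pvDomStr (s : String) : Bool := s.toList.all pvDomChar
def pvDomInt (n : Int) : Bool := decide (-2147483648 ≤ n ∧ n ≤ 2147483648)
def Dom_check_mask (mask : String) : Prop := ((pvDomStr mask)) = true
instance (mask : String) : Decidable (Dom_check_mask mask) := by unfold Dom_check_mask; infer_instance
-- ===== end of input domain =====

-- B replaces A's two-stage value loop + copy/sort(reverse=True)/equality test by a single pass
-- carrying the previous octet string (simpler, no sort); same return value everywhere A returns.

-- ===== PORT A =====
-- MASK_VALS = { 0:0, 128:1, ..., 255:8 }
def pvMASK_VALS : PySem.Dict Int Int :=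
  PySem.Dict.mk [(0,0),(128,1),(192,2),(224,3),(240,4),(248,5),(252,6),(254,7),(255,8)]

-- for num in lst: if int(num) not in list(MASK_VALS.keys()): return False
def pvCheckValsA : List String → Bool
  | [] => true
  | num :: rest =>
    match PySem.Int.ofStr? num with
    | none => false  -- int(num) raises ValueError here; Pre_ excludes these inputs
    | some v => if (PySem.Dict.keys pvMASK_VALS).contains v then pvCheckValsA rest else false

def check_mask (mask : String) : Bool :=
  let lst := (PySem.Str.split? mask ".").getD []   -- mask.split('.'); sep "." ≠ "" so split? is some
  if lst.length ≠ 4 then false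
  else if pvCheckValsA lst = false then false
  else
    let sortedLst := PySem.List.sorted lst (fun x => x) true  -- copy + sort(reverse=True)
    if lst ≠ sortedLst then false else true

-- ===== PORT B =====
-- the single pass: prev is None before the first part, then the previous part string
def pvScanB : Option String → List String → Bool
  | _, [] => true
  | prev, p :: rest =>
    match PySem.Int.ofStr? p with
    | none => false  -- int(p) raises ValueError here; Pre_ excludes these inputs
    | some v =>
      if ¬ pvMASK_VALS.contains v then false
      else
        match prev with
        | some q => if q < p then false else pvScanB (some p) rest
        | none => pvScanB (some p) rest

def check_mask_alt (mask : String) : Bool :=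
  match (PySem.Str.split? mask ".").getD [] with   -- mask.split('.'); sep "." ≠ "" so split? is some
  | parts => if parts.length = 4 then pvScanB none parts else false

-- ===== PRECONDITION & SPEC =====
-- Pre_ excludes exactly the inputs where A raises ValueError: a 4-part split in which some part
-- does not parse as an int while every earlier part parses to a valid mask-byte value.
def Pre_check_mask (mask : String) : Prop :=
  let lst := (PySem.Str.split? mask ".").getD []
  lst.length = 4 →
  ∀ i < 4, (PySem.Int.ofStr? (lst.getD i "")).isNone = true →
    ∃ j < i, ((PySem.Int.ofStr? (lst.getD j "")).any
        fun v => decide (v ∈ ([0,128,192,224,240,248,252,254,255] : List Int))) = false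
instance (mask : String) : Decidable (Pre_check_mask mask) := by unfold Pre_check_mask; infer_instance

def pvWitness_check_mask : String := "255.255.0.0"

def Spec_check_mask (mask : String) (out : Bool) : Prop := out = check_mask_alt mask
instance (mask : String) (out : Bool) : Decidable (Spec_check_mask mask out) := by unfold Spec_check_mask; infer_instance

-- ===== CLAIM (what is proved, stated in full; the proofs are below) =====
def Claim_equal_check_mask : Prop := ∀ (mask : String), Dom_check_mask mask → Pre_check_mask mask → Spec_check_mask mask (check_mask mask)

-- ===== LEMMAS AND PROOFS =====

-- the pure ordering scan that B's pass reduces to once all values are known valid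
def pvChain : Option String → List String → Bool
  | _, [] => true
  | prev, p :: rest =>
    match prev with
    | some q => if q < p then false else pvChain (some p) rest
    | none => pvChain (some p) rest

-- B's pass returns true only if every part passes A's value check
theorem pvScanB_true_vals (l : List String) (prev : Option String)
    (h : pvScanB prev l = true) : pvCheckValsA l = true := by
  induction l generalizing prev with
  | nil => rfl
  | cons p rest ih =>
    simp only [pvScanB] at h
    cases hp : PySem.Int.ofStr? p with
    | none => simp [hp] at h
    | some v =>
      simp only [hp] at h
      by_cases hc : pvMASK_VALS.contains v = true
      · rw [if_neg (by simp [hc])] at h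
        have hk : (PySem.Dict.keys pvMASK_VALS).contains v = true := by
          simpa [PySem.Dict.contains, PySem.Dict.keys] using hc
        simp only [pvCheckValsA, hp, if_pos hk]
        cases prev with
        | none => exact ih _ h
        | some q =>
          have h' : (if q < p then false else pvScanB (some p) rest) = true := h
          by_cases hq : q < p
          · rw [if_pos hq] at h'; cases h'
          · rw [if_neg hq] at h'; exact ih _ h'
      · rw [if_pos (by simp [hc])] at h; cases h

-- if all values are valid, B's pass is exactly the ordering scan
theorem pvScanB_eq_chain (l : List String) (prev : Option String)
    (h : pvCheckValsA l = true) : pvScanB prev l = pvChain prev l := by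
  induction l generalizing prev with
  | nil => rfl
  | cons p rest ih =>
    simp only [pvCheckValsA] at h
    cases hp : PySem.Int.ofStr? p with
    | none => simp [hp] at h
    | some v =>
      simp only [hp] at h
      by_cases hk : (PySem.Dict.keys pvMASK_VALS).contains v = true
      · rw [if_pos hk] at h
        have hc : pvMASK_VALS.contains v = true := by
          simpa [PySem.Dict.contains, PySem.Dict.keys] using hk
        simp only [pvScanB, pvChain, hp]
        rw [if_neg (by simp [hc])]
        cases prev with
        | none => exact ih _ h
        | some q =>
          show (if q < p then false else pvScanB (some p) rest)
              = (if q < p then false else pvChain (some p) rest)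
          by_cases hq : q < p
          · rw [if_pos hq, if_pos hq]
          · rw [if_neg hq, if_neg hq]; exact ih _ h
      · rw [if_neg hk] at h; cases h

-- the ordering scan as a pairwise zip test
def pvZipAll (l : List String) : Bool := (l.zip (l.drop 1)).all fun p => decide (p.2 ≤ p.1)

theorem pvChain_some (q : String) (l : List String) : pvChain (some q) l = pvZipAll (q :: l) := by
  induction l generalizing q with
  | nil => rfl
  | cons p rest ih =>
    simp only [pvChain, pvZipAll, List.drop_succ_cons, List.drop_zero, List.zip_cons_cons,
      List.all_cons]
    by_cases hq : q < p
    · rw [if_pos hq]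
      have : ¬ p ≤ q := not_le.mpr hq
      simp [this]
    · rw [if_neg hq]
      have : p ≤ q := not_lt.mp hq
      simpa [this, pvZipAll] using ih p

theorem pvChain_none (l : List String) : pvChain none l = pvZipAll l := by
  cases l with
  | nil => rfl
  | cons p rest => simpa [pvChain] using pvChain_some p rest

-- the pairwise scan decides "non-increasing"
theorem pvZipAll_iff (l : List String) :
    pvZipAll l = true ↔ l.Pairwise (fun a b => b ≤ a) := by
  induction l with
  | nil => simp [pvZipAll]
  | cons a t ih =>
    cases t with
    | nil => simp [pvZipAll]
    | cons b t' =>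
      rw [List.pairwise_cons]
      simp only [pvZipAll, List.drop_succ_cons, List.drop_zero, List.zip_cons_cons, List.all_cons,
        Bool.and_eq_true, decide_eq_true_eq]
      constructor
      · rintro ⟨hba, h⟩
        have hp : (b :: t').Pairwise (fun a b : String => b ≤ a) :=
          ih.mp (by simpa [pvZipAll] using h)
        refine ⟨?_, hp⟩
        intro x hx
        rcases List.mem_cons.mp hx with rfl | hx
        · exact hba
        · exact le_trans ((List.pairwise_cons.mp hp).1 x hx) hba
      · rintro ⟨ha, hp⟩
        exact ⟨ha b (List.mem_cons_self), by simpa [pvZipAll] using ih.mpr hp⟩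

-- "lst == sorted(lst, reverse=True)" decides the same property
theorem pvSortEq_iff (l : List String) :
    l = PySem.List.sorted l (fun x => x) true ↔ l.Pairwise (fun a b => b ≤ a) := by
  constructor
  · intro h
    have := PySem.List.sorted_pairwise_rev l (fun x => x)
    rw [← h] at this
    simpa using this
  · intro h
    exact (PySem.List.sorted_rev_eq_self_of_pairwise l (fun x => x) (by simpa using h)).symm

-- A's ordering stage equals B's pass once the values are known valid
theorem pvOrder_eq (l : List String) (hv : pvCheckValsA l = true) :
    (if l ≠ PySem.List.sorted l (fun x => x) true then false else true) = pvScanB none l := by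
  rw [pvScanB_eq_chain l none hv, pvChain_none]
  by_cases h : l = PySem.List.sorted l (fun x => x) true
  · rw [if_neg (not_not_intro h)]
    exact ((pvZipAll_iff l).mpr ((pvSortEq_iff l).mp h)).symm
  · rw [if_pos h]
    cases hc : pvZipAll l with
    | true => exact absurd ((pvSortEq_iff l).mpr ((pvZipAll_iff l).mp hc)) h
    | false => rfl

-- ===== VERDICT (by name: the statement is the Claim_ definition above) =====
theorem check_mask_spec : Claim_equal_check_mask := by
  intro mask _ _
  unfold Spec_check_mask check_mask check_mask_alt
  set lst := (PySem.Str.split? mask ".").getD [] with hl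
  show (if lst.length ≠ 4 then false
        else if pvCheckValsA lst = false then false
        else if lst ≠ PySem.List.sorted lst (fun x => x) true then false else true)
      = (if lst.length = 4 then pvScanB none lst else false)
  by_cases hlen : lst.length = 4
  · rw [if_neg (by simp [hlen]), if_pos hlen]
    by_cases hv : pvCheckValsA lst = true
    · rw [if_neg (by simp [hv])]
      exact pvOrder_eq lst hv
    · have hv' : pvCheckValsA lst = false := by
        cases h : pvCheckValsA lst
        · rfl
        · exact absurd h hv
      rw [if_pos hv']
      cases hb : pvScanB none lst with
      | false => rfl
      | true => exact absurd (pvScanB_true_vals lst none hb) (by simp [hv'])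
  · rw [if_pos (by simp [hlen]), if_neg hlen]
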